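-- pv_equiv track=rewrite | github.com/ZazaSaki/Automa-oPython | tt.py | nifcheck
-- ===== SOURCE A (Python) =====
-- def nifcheck(numero):
--     """ Validação do número de identificação fiscal
--
--     >>> valida_nif('999999990')
--     True
--     >>> valida_nif('999999999')
--     False
--     >>> valida_nif('501442600') # IEFP
--     True
--     """
--     EXPECTED_DIGITS = 9
--     if not numero.isdigit() or len(numero) != EXPECTED_DIGITS:
--         return False
--     soma = sum([int(dig) * (EXPECTED_DIGITS - pos) for pos, dig in enumerate(numero)])
--     resto = soma % 11
--     if (numero[-1] == '0' and resto == 1):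
--         resto = (soma + 10) % 11
--     if resto == 0:
--         return True
--     else:
--         return False
-- ===== SOURCE B (Python) =====
-- def nifcheck(numero):
--     """Validate a Portuguese NIF by computing the expected check digit from
--     the first eight digits and comparing it with the ninth."""
--     EXPECTED_DIGITS = 9
--     if not numero.isdigit() or len(numero) != EXPECTED_DIGITS:
--         return False
--     sum8 = 0
--     for i in range(8):
--         sum8 += int(numero[i]) * (EXPECTED_DIGITS - i)
--     control = 11 - sum8 % 11
--     if control >= 10:
--         control = 0
--     return control == int(numero[8])
-- ===== Notes on version B (the rewrite author's own statement) =====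
-- stated objective: alternative
-- what changed: B replaces A's sum over all nine digits with a trailing-zero re-mod patch by computing the expected check digit from the first eight digits (control = 11 - sum8 % 11, collapsed to 0 when >= 10) and comparing it to the ninth digit; A's special case falls out of the collapse instead of an explicit patch.
import Mathlib
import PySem

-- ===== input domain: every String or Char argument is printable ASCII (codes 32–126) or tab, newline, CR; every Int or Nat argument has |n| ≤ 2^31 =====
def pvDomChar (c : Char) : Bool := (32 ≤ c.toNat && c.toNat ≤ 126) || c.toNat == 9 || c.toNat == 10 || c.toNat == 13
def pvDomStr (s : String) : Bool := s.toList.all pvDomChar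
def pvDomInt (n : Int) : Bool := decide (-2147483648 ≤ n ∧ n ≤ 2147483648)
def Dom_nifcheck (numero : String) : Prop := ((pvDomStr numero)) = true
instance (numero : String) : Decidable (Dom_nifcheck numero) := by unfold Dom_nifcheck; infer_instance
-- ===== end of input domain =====

-- B validates the NIF by deriving the expected check digit from the first eight digits
-- (control = 11 - sum8 % 11, collapsed to 0 when ≥ 10) instead of A's nine-digit sum
-- with an explicit re-mod patch for a trailing zero digit; same cost, different decomposition.


-- ===== PORT A =====
-- int(dig) is ported as (PySem.Int.ofChars? [dig]).getD 0; the isdigit guard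
-- guarantees the parse succeeds, so the default is never reached. Likewise the
-- guard guarantees numero[-1] exists, so pyGet? returns some.
def nifcheck (numero : String) : Bool :=
  if !PySem.Str.strIsdigit numero || PySem.Str.len numero != 9 then false
  else
    let soma := ((PySem.List.enumerate numero.toList 0).map
        (fun p => (PySem.Int.ofChars? [p.2]).getD 0 * (9 - p.1))).sum
    let resto := PySem.Int.mod soma 11
    let resto := if PySem.Str.pyGet? numero (-1) = some '0' ∧ resto = 1
                 then PySem.Int.mod (soma + 10) 11 else resto
    resto == 0

-- ===== PORT B =====
-- transliteration of Source B; same guard, then the for-loop over range(8) as a foldl;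
-- the guard guarantees every pyGet? is some and every ofChars? parses, so the
-- getD defaults are never reached.
def nifcheck_alt (numero : String) : Bool :=
  if !PySem.Str.strIsdigit numero || PySem.Str.len numero != 9 then false
  else
    let sum8 := (PySem.List.pyRange 0 8 1).foldl
      (fun acc i =>
        acc + (PySem.Int.ofChars? [(PySem.Str.pyGet? numero i).getD ' ']).getD 0 * (9 - i)) 0
    let control := 11 - PySem.Int.mod sum8 11
    let control := if 10 ≤ control then 0 else control
    control == (PySem.Int.ofChars? [(PySem.Str.pyGet? numero 8).getD ' ']).getD 0

-- ===== PRECONDITION & SPEC =====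
def Spec_nifcheck (numero : String) (out : Bool) : Prop := out = nifcheck_alt numero
instance (numero : String) (out : Bool) : Decidable (Spec_nifcheck numero out) := by unfold Spec_nifcheck; infer_instance

-- ===== CLAIM (what is proved, stated in full; the proofs are below) =====
def Claim_equal_nifcheck : Prop := ∀ (numero : String), Dom_nifcheck numero → Spec_nifcheck numero (nifcheck numero)

-- ===== LEMMAS AND PROOFS =====

theorem pv_ofChars_digit (c : Char) (h : PySem.Chars.isdigit c = true) :
    PySem.Int.ofChars? [c] = some ((c.toNat : Int) - 48) := by
  simp [PySem.Chars.isdigit, Char.le_def, UInt32.le_iff_toNat_le] at h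
  have h0 : 48 ≤ c.toNat := h.1
  have h1 : c.toNat ≤ 57 := h.2
  interval_cases hc : c.toNat <;>
    (first
      | (have : c = '0' := Char.ext (by apply UInt32.toNat_inj.mp; simpa using hc); subst this; decide)
      | (have : c = '1' := Char.ext (by apply UInt32.toNat_inj.mp; simpa using hc); subst this; decide)
      | (have : c = '2' := Char.ext (by apply UInt32.toNat_inj.mp; simpa using hc); subst this; decide)
      | (have : c = '3' := Char.ext (by apply UInt32.toNat_inj.mp; simpa using hc); subst this; decide)
      | (have : c = '4' := Char.ext (by apply UInt32.toNat_inj.mp; simpa using hc); subst this; decide)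
      | (have : c = '5' := Char.ext (by apply UInt32.toNat_inj.mp; simpa using hc); subst this; decide)
      | (have : c = '6' := Char.ext (by apply UInt32.toNat_inj.mp; simpa using hc); subst this; decide)
      | (have : c = '7' := Char.ext (by apply UInt32.toNat_inj.mp; simpa using hc); subst this; decide)
      | (have : c = '8' := Char.ext (by apply UInt32.toNat_inj.mp; simpa using hc); subst this; decide)
      | (have : c = '9' := Char.ext (by apply UInt32.toNat_inj.mp; simpa using hc); subst this; decide))

theorem pv_char_eq_zero_iff (c : Char) : c = '0' ↔ c.toNat = 48 := by
  constructor
  · rintro rfl; rfl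
  · intro h; exact Char.ext (by apply UInt32.toNat_inj.mp; simpa using h)

theorem pv_digit_bounds (c : Char) (h : PySem.Chars.isdigit c = true) :
    48 ≤ (c.toNat : Int) ∧ (c.toNat : Int) ≤ 57 := by
  simp [PySem.Chars.isdigit, Char.le_def, UInt32.le_iff_toNat_le] at h
  exact ⟨by exact_mod_cast h.1, by exact_mod_cast h.2⟩

theorem pv_nif_arith (c : Char) (s t : Int) (hd : PySem.Chars.isdigit c = true)
    (hst : t = s + ((c.toNat : Int) - 48)) :
    (((if (c = '0' ∧ t % 11 = 1) then (t + 10) % 11 else t % 11) = 0)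
    ↔ ((if 10 ≤ 11 - s % 11 then (0:Int) else 11 - s % 11) = (c.toNat : Int) - 48)) := by
  obtain ⟨h1, h2⟩ := pv_digit_bounds c hd
  subst hst
  simp only [pv_char_eq_zero_iff]
  split_ifs <;> omega

-- ===== VERDICT (by name: the statement is the Claim_ definition above) =====
theorem nifcheck_spec : Claim_equal_nifcheck := by
  intro numero _
  unfold Spec_nifcheck nifcheck nifcheck_alt
  by_cases hg : (!PySem.Str.strIsdigit numero || PySem.Str.len numero != 9) = true
  · simp only [hg, if_true]
  · simp only [hg]
    simp only [Bool.or_eq_true, Bool.not_eq_true', bne_iff_ne, not_or, not_not, ne_eq] at hg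
    obtain ⟨hdig, hlen⟩ := hg
    have hlen' : numero.toList.length = 9 := by
      have h := hlen; simp [PySem.Str.len] at h
      have h2 : numero.length = 9 := by exact_mod_cast h
      simpa using h2
    have hall : ∀ c ∈ numero.toList, PySem.Chars.isdigit c = true := by
      simp [PySem.Str.strIsdigit, PySem.Chars.strIsdigit] at hdig
      exact hdig.2
    obtain ⟨c0, c1, c2, c3, c4, c5, c6, c7, c8, htl⟩ :
        ∃ c0 c1 c2 c3 c4 c5 c6 c7 c8,
          numero.toList = [c0, c1, c2, c3, c4, c5, c6, c7, c8] := by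
      match hm : numero.toList, hlen' with
      | [c0, c1, c2, c3, c4, c5, c6, c7, c8], _ =>
        exact ⟨c0, c1, c2, c3, c4, c5, c6, c7, c8, rfl⟩
    have hRange : PySem.List.pyRange 0 8 1 = [0,1,2,3,4,5,6,7] := by decide
    have hmem := htl ▸ hall
    have e0 := pv_ofChars_digit c0 (hmem c0 (by simp))
    have e1 := pv_ofChars_digit c1 (hmem c1 (by simp))
    have e2 := pv_ofChars_digit c2 (hmem c2 (by simp))
    have e3 := pv_ofChars_digit c3 (hmem c3 (by simp))
    have e4 := pv_ofChars_digit c4 (hmem c4 (by simp))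
    have e5 := pv_ofChars_digit c5 (hmem c5 (by simp))
    have e6 := pv_ofChars_digit c6 (hmem c6 (by simp))
    have e7 := pv_ofChars_digit c7 (hmem c7 (by simp))
    have e8 := pv_ofChars_digit c8 (hmem c8 (by simp))
    obtain ⟨b0l, b0h⟩ := pv_digit_bounds c0 (hmem c0 (by simp))
    obtain ⟨b1l, b1h⟩ := pv_digit_bounds c1 (hmem c1 (by simp))
    obtain ⟨b2l, b2h⟩ := pv_digit_bounds c2 (hmem c2 (by simp))
    obtain ⟨b3l, b3h⟩ := pv_digit_bounds c3 (hmem c3 (by simp))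
    obtain ⟨b4l, b4h⟩ := pv_digit_bounds c4 (hmem c4 (by simp))
    obtain ⟨b5l, b5h⟩ := pv_digit_bounds c5 (hmem c5 (by simp))
    obtain ⟨b6l, b6h⟩ := pv_digit_bounds c6 (hmem c6 (by simp))
    obtain ⟨b7l, b7h⟩ := pv_digit_bounds c7 (hmem c7 (by simp))
    obtain ⟨b8l, b8h⟩ := pv_digit_bounds c8 (hmem c8 (by simp))
    simp only [PySem.Str.pyGet?, htl, hRange, PySem.Chars.pyGet?_eq_listPyGet?]
    simp [PySem.List.enumerate_cons, PySem.List.enumerate_nil, PySem.List.pyGet?,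
      PySem.List.pyIdx?, e0, e1, e2, e3, e4, e5, e6, e7, e8, List.foldl]
    exact pv_nif_arith c8 _ _ (hmem c8 (by simp)) (by ring)
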